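-- pv_equiv track=rewrite | github.com/alejocp00/Generalized-Vector-Space-Model-IRS | src/code/preprocess.py | docs_vectorial_rep
-- ===== SOURCE A (Python) =====
-- def docs_vectorial_rep(vocabulary, filtered_tokens):
--     """
--     Generate vectorial representations of documents based on the presence or absence of vocabulary tokens.
--
--     Args:
--         vocabulary (list): A list of tokens representing the vocabulary.
--         filtered_tokens (list): A list of tokenized documents with filtered tokens.
--
--     Returns:
--         list: A list of vectorial representations of the documents.
--     """
--     vectorial_docs = []
--     for doc in filtered_tokens:
--         doc_rep = []
--         for voc in vocabulary:
--             if voc in doc: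
--                 doc_rep.append(1)
--             else:
--                 doc_rep.append(0)
--         vectorial_docs.append(doc_rep)
--     return vectorial_docs
-- ===== SOURCE B (Python) =====
-- def docs_vectorial_rep(vocabulary, filtered_tokens):
--     # Inverted index: token -> list of all its column indices in the vocabulary.
--     index = {}
--     for i, voc in enumerate(vocabulary):
--         index[voc] = index.get(voc, []) + [i]
--     n = len(vocabulary)
--     result = []
--     for doc in filtered_tokens:
--         vec = [0] * n
--         for tok in doc:
--             for i in index.get(tok, []):
--                 vec[i] = 1
--         result.append(vec)
--     return result
-- ===== Notes on version B (the rewrite author's own statement) =====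
-- stated objective: faster
-- what changed: Replaced the per-document scan of the whole vocabulary (membership test per vocabulary token) by an inverted index from token to its vocabulary column indices built once, then a zero vector per document scattered to 1 at the indices of each document token.
import Mathlib
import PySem

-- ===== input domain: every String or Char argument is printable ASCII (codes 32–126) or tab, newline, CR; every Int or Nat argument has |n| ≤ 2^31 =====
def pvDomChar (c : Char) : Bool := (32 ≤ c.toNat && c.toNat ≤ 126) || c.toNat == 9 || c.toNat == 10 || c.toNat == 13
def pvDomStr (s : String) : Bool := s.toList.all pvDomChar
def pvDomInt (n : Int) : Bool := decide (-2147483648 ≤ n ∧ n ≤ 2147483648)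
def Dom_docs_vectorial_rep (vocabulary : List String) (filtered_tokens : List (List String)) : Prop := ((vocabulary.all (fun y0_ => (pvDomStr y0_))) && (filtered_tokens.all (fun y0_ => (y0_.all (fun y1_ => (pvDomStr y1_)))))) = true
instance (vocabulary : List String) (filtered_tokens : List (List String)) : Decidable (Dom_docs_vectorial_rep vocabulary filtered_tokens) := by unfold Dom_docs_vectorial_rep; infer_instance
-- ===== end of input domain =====

-- B replaces A's per-document scan of the whole vocabulary by an inverted index (token -> column
-- indices) built once, plus a zero vector scattered over each document's tokens (objective: faster).

-- ===== PORT A =====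
-- literal port: outer loop appends one row per doc; inner loop appends 1/0 per vocabulary token
def docs_vectorial_rep (vocabulary : List String) (filtered_tokens : List (List String)) : List (List Int) :=
  filtered_tokens.foldl (fun vectorial_docs doc =>
    vectorial_docs ++ [vocabulary.foldl (fun doc_rep voc =>
      doc_rep ++ [if doc.contains voc then (1 : Int) else 0]) []]) []

-- ===== PORT B =====
-- index[voc] = index.get(voc, []) + [i]  over enumerate(vocabulary)
def pvIndex (vocabulary : List String) : PySem.Dict String (List Int) :=
  (PySem.List.enumerate vocabulary 0).foldl
    (fun index p => index.insert p.2 (index.getD p.2 [] ++ [p.1])) PySem.Dict.empty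

def docs_vectorial_rep_alt (vocabulary : List String) (filtered_tokens : List (List String)) : List (List Int) :=
  let index := pvIndex vocabulary
  let n := vocabulary.length
  filtered_tokens.foldl (fun result doc =>
    result ++ [doc.foldl (fun vec tok =>
      (index.getD tok []).foldl (fun v i => PySem.List.pySetD v i 1) vec)
      (List.replicate n 0)]) []

-- ===== PRECONDITION & SPEC =====
def Spec_docs_vectorial_rep (vocabulary : List String) (filtered_tokens : List (List String)) (out : List (List Int)) : Prop := out = docs_vectorial_rep_alt vocabulary filtered_tokens
instance (vocabulary : List String) (filtered_tokens : List (List String)) (out : List (List Int)) : Decidable (Spec_docs_vectorial_rep vocabulary filtered_tokens out) := by unfold Spec_docs_vectorial_rep; infer_instance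

-- ===== CLAIM (what is proved, stated in full; the proofs are below) =====
def Claim_equal_docs_vectorial_rep : Prop := ∀ (vocabulary : List String) (filtered_tokens : List (List String)), Dom_docs_vectorial_rep vocabulary filtered_tokens → Spec_docs_vectorial_rep vocabulary filtered_tokens (docs_vectorial_rep vocabulary filtered_tokens)

-- ===== LEMMAS AND PROOFS =====

-- the index fold, from any start offset and accumulator
lemma pvIndex_fold_getD (vs : List String) (s : Int) (d : PySem.Dict String (List Int)) (tok : String) :
    ((PySem.List.enumerate vs s).foldl
        (fun index p => index.insert p.2 (index.getD p.2 [] ++ [p.1])) d).getD tok []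
      = d.getD tok [] ++ (((PySem.List.enumerate vs s).filter (fun p => p.2 == tok)).map (·.1)) := by
  induction vs generalizing s d with
  | nil => simp [PySem.List.enumerate]
  | cons v vs ih =>
    rw [PySem.List.enumerate_cons]
    simp only [List.foldl_cons, List.filter_cons]
    rw [ih]
    by_cases h : v = tok
    · subst h
      simp [PySem.Dict.getD, PySem.Dict.get?_insert_self]
    · have : ((s, v).2 == tok) = false := by simp [h]
      simp only [this, Bool.false_eq_true, if_false]
      congr 1
      simp [PySem.Dict.getD, PySem.Dict.get?_insert_of_ne _ _ (Ne.symm h)]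

lemma pvIndex_getD_mem (vocabulary : List String) (tok : String) (i : Int) :
    i ∈ (pvIndex vocabulary).getD tok [] ↔
      ∃ (k : Nat) (h : k < vocabulary.length), i = (k : Int) ∧ vocabulary[k] = tok := by
  unfold pvIndex
  rw [pvIndex_fold_getD]
  have hemp : (PySem.Dict.empty : PySem.Dict String (List Int)).getD tok [] = [] := by
    simp [PySem.Dict.empty, PySem.Dict.get?, PySem.Dict.getD]
  rw [hemp, List.nil_append]
  constructor
  · intro hm
    simp only [List.mem_map, List.mem_filter] at hm
    rcases hm with ⟨p, ⟨hp, htok⟩, hi⟩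
    rcases (PySem.List.mem_enumerate_iff _ _ _).mp hp with ⟨k, hk, rfl⟩
    exact ⟨k, hk, by simpa using hi.symm, by simpa using (beq_iff_eq.mp htok)⟩
  · rintro ⟨k, hk, rfl, hv⟩
    exact List.mem_map.mpr ⟨((0 : Int) + k, vocabulary[k]), List.mem_filter.mpr
      ⟨(PySem.List.mem_enumerate_iff _ _ _).mpr ⟨k, hk, rfl⟩, by simp [hv]⟩, by simp⟩

-- one token's scatter: length kept, entry j becomes 1 exactly when j is in the index list
lemma pvScatter_spec (L : List Int) (vec : List Int)
    (hL : ∀ i ∈ L, ∃ k : Nat, i = (k : Int) ∧ k < vec.length) (j : Nat) (hj : j < vec.length) :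
    (L.foldl (fun v i => PySem.List.pySetD v i 1) vec).length = vec.length ∧
    PySem.List.pyGetD (L.foldl (fun v i => PySem.List.pySetD v i 1) vec) (j : Int) 0
      = if (j : Int) ∈ L then 1 else PySem.List.pyGetD vec (j : Int) 0 := by
  induction L generalizing vec with
  | nil => simp
  | cons i L ih =>
    rcases hL i (List.mem_cons_self ..) with ⟨k, rfl, hk⟩
    have hlen : (PySem.List.pySetD vec (k : Int) 1).length = vec.length := by
      simp [PySem.List.pySetD_natCast]
    have hL' : ∀ i ∈ L, ∃ k' : Nat, i = (k' : Int) ∧ k' < (PySem.List.pySetD vec (k : Int) 1).length := by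
      rw [hlen]; exact fun i hi => hL i (List.mem_cons_of_mem _ hi)
    obtain ⟨ih1, ih2⟩ := ih (PySem.List.pySetD vec (k : Int) 1) hL' (by rw [hlen]; exact hj)
    refine ⟨by simpa [hlen] using ih1, ?_⟩
    simp only [List.foldl_cons] at *
    rw [ih2, PySem.List.pyGetD_pySetD_natCast vec k j 1 0 hk]
    by_cases hjL : (j : Int) ∈ L
    · simp [hjL]
    · by_cases hjk : j = k
      · subst hjk; simp
      · simp [hjL, List.mem_cons, hjk]

-- a whole document's scatter
lemma pvRow_spec (vocabulary : List String) (doc : List String) (vec : List Int)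
    (hlen : vec.length = vocabulary.length) (j : Nat) (hj : j < vocabulary.length) :
    (doc.foldl (fun vec tok =>
        ((pvIndex vocabulary).getD tok []).foldl (fun v i => PySem.List.pySetD v i 1) vec) vec).length
      = vocabulary.length ∧
    PySem.List.pyGetD (doc.foldl (fun vec tok =>
        ((pvIndex vocabulary).getD tok []).foldl (fun v i => PySem.List.pySetD v i 1) vec) vec) (j : Int) 0
      = if vocabulary[j] ∈ doc then 1 else PySem.List.pyGetD vec (j : Int) 0 := by
  induction doc generalizing vec with
  | nil => simpa using hlen
  | cons tok doc ih =>
    have hL : ∀ i ∈ (pvIndex vocabulary).getD tok [], ∃ k : Nat, i = (k : Int) ∧ k < vec.length := by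
      intro i hi
      rcases (pvIndex_getD_mem vocabulary tok i).mp hi with ⟨k, hk, rfl, _⟩
      exact ⟨k, rfl, by omega⟩
    obtain ⟨h1, h2⟩ := pvScatter_spec ((pvIndex vocabulary).getD tok []) vec hL j (by omega)
    obtain ⟨ih1, ih2⟩ := ih _ (by rw [h1, hlen])
    refine ⟨by simpa using ih1, ?_⟩
    simp only [List.foldl_cons] at *
    rw [ih2, h2]
    by_cases hmem : vocabulary[j] ∈ doc
    · simp [hmem]
    · by_cases heq : vocabulary[j] = tok
      · have : (j : Int) ∈ (pvIndex vocabulary).getD tok [] :=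
          (pvIndex_getD_mem vocabulary tok (j : Int)).mpr ⟨j, hj, rfl, heq⟩
        simp [heq, this]
      · have : (j : Int) ∉ (pvIndex vocabulary).getD tok [] := by
          intro hc
          rcases (pvIndex_getD_mem vocabulary tok (j : Int)).mp hc with ⟨k, hk, hkj, hv⟩
          have : k = j := by exact_mod_cast hkj.symm
          exact heq (this ▸ hv)
        simp [heq, this]

lemma pvScatter_len (L : List Int) (vec : List Int) :
    (L.foldl (fun v i => PySem.List.pySetD v i 1) vec).length = vec.length := by
  induction L generalizing vec with
  | nil => rfl
  | cons i L ih => simp [List.foldl_cons, ih, PySem.List.length_pySetD]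

lemma pvRow_len (vocabulary : List String) (doc : List String) (vec : List Int) :
    (doc.foldl (fun vec tok =>
        ((pvIndex vocabulary).getD tok []).foldl (fun v i => PySem.List.pySetD v i 1) vec) vec).length
      = vec.length := by
  induction doc generalizing vec with
  | nil => rfl
  | cons tok doc ih => simp [List.foldl_cons, ih, pvScatter_len]

-- ===== VERDICT (by name: the statement is the Claim_ definition above) =====
theorem docs_vectorial_rep_spec : Claim_equal_docs_vectorial_rep := by
  intro vocabulary filtered_tokens _
  unfold Spec_docs_vectorial_rep docs_vectorial_rep docs_vectorial_rep_alt
  rw [PySem.List.foldl_append_singleton_eq_map, PySem.List.foldl_append_singleton_eq_map]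
  apply List.map_congr_left
  intro doc _
  rw [PySem.List.foldl_append_singleton_eq_map]
  apply List.ext_getElem
  · simp [pvRow_len]
  · intro j hj1 hj2
    have hjv : j < vocabulary.length := by simpa using hj1
    obtain ⟨hlen, hget⟩ := pvRow_spec vocabulary doc (List.replicate vocabulary.length 0)
        (by simp) j hjv
    rw [PySem.List.pyGetD_natCast, PySem.List.pyGetD_natCast,
        List.getD_eq_getElem?_getD, List.getD_eq_getElem?_getD,
        List.getElem?_eq_getElem (by omega : j < _), List.getElem?_eq_getElem (by simpa using hjv)] at hget
    simp only [Option.getD_some] at hget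
    simp only [List.nil_append, List.getElem_map]
    rw [hget]
    by_cases hm : vocabulary[j] ∈ doc <;> simp [hm, List.getElem_replicate]
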